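-- pv_equiv track=rewrite | github.com/TamiaLab/PyBBCodeParser | skcode/tokenizer.py | tokenize_newline
-- ===== SOURCE A (Python) =====
-- TOKEN_DATA = 0
--
-- TOKEN_NEWLINE = 1
--
-- def tokenize_newline(data):
--     """
--     Given a string that does not contain any tags, this function will
--     yield a list of ``TOKEN_NEWLINE`` and ``TOKEN_DATA`` tokens in such way
--     that if you concatenate their data, you will have the original string.
--     N.B. Newline must have been normalized to ``\n`` before calling this function.
--     :param data: Input data string to be tokenize.
--     """
--     lines = data.split('\n')
--     last_line_num = len(lines) - 1
--     for num, line in enumerate(lines):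
--         if line:
--             yield TOKEN_DATA, None, None, line
--         if num < last_line_num:
--             yield TOKEN_NEWLINE, None, None, '\n'
-- ===== SOURCE B (Python) =====
-- TOKEN_DATA = 0
--
-- TOKEN_NEWLINE = 1
--
-- def tokenize_newline(data):
--     """Single incremental pass: accumulate characters in a buffer, flush a
--     nonempty buffer as a DATA token at each '\n' (and at the end), yield a
--     NEWLINE token for every '\n'. No intermediate line list is built."""
--     buf = []
--     for ch in data:
--         if ch == '\n':
--             if buf:
--                 yield TOKEN_DATA, None, None, ''.join(buf)
--                 buf = []
--             yield TOKEN_NEWLINE, None, None, '\n'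
--         else:
--             buf.append(ch)
--     if buf:
--         yield TOKEN_DATA, None, None, ''.join(buf)
-- ===== Notes on version B (the rewrite author's own statement) =====
-- stated objective: alternative
-- what changed: Replaces the split-into-lines list plus an enumerate loop with one incremental character pass that flushes a buffer as a DATA token at each newline character and at the end, emitting one NEWLINE token per newline; no line list and no index/last-line bookkeeping.
import Mathlib
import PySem

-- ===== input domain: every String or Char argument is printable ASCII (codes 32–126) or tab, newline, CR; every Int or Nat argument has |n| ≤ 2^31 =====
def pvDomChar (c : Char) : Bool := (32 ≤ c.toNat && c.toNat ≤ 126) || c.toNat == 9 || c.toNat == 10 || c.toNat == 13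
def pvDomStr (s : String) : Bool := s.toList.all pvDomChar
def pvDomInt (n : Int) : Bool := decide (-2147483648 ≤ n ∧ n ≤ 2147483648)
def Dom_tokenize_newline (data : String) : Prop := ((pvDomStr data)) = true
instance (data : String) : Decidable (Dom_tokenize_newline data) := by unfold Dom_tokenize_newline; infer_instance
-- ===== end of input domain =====

-- B replaces split('\n') + a loop over the line list with one incremental buffered character pass (alternative decomposition, same cost).

-- ===== PORT A =====
-- A: data.split('\n'), then for (num, line) in enumerate(lines): yield DATA if line nonempty, NEWLINE if not last line.
def tokenize_newline (data : String) : List (Int × Option String × Option String × String) :=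
  let lines : List String := (PySem.Chars.splitOn data.toList ['\n']).map String.ofList
  let last_line_num : Int := (lines.length : Int) - 1
  (PySem.List.enumerate lines).foldl
    (fun acc p =>
      acc ++ (if p.2 ≠ "" then [((0 : Int), (none : Option String), (none : Option String), p.2)] else [])
          ++ (if p.1 < last_line_num then [((1 : Int), (none : Option String), (none : Option String), "\n")] else []))
    []

-- ===== PORT B =====
-- B: one pass over the characters with a buffer, flushing nonempty buffers as DATA tokens.
def tokAltGo : List Char → List Char → List (Int × Option String × Option String × String)
  | [], buf => if buf.isEmpty then [] else [((0 : Int), none, none, String.ofList buf)]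
  | c :: cs, buf =>
      if c = '\n' then
        (if buf.isEmpty then [] else [((0 : Int), none, none, String.ofList buf)])
          ++ ((1 : Int), (none : Option String), (none : Option String), "\n") :: tokAltGo cs []
      else
        tokAltGo cs (buf ++ [c])

def tokenize_newline_alt (data : String) : List (Int × Option String × Option String × String) :=
  tokAltGo data.toList []

-- ===== PRECONDITION & SPEC =====
def Spec_tokenize_newline (data : String) (out : List (Int × Option String × Option String × String)) : Prop := out = tokenize_newline_alt data
instance (data : String) (out : List (Int × Option String × Option String × String)) : Decidable (Spec_tokenize_newline data out) := by unfold Spec_tokenize_newline; infer_instance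

-- ===== CLAIM (what is proved, stated in full; the proofs are below) =====
def Claim_equal_tokenize_newline : Prop := ∀ (data : String), Dom_tokenize_newline data → Spec_tokenize_newline data (tokenize_newline data)

-- ===== LEMMAS AND PROOFS =====

-- reference split on '\n' (structural)
def splitNl : List Char → List (List Char)
  | [] => [[]]
  | c :: rest => if c = '\n' then [] :: splitNl rest else (splitNl rest).modifyHead (c :: ·)

theorem splitNl_ne_nil (cs : List Char) : splitNl cs ≠ [] := by
  induction cs with
  | nil => simp [splitNl]
  | cons c rest ih =>
    simp only [splitNl]
    split_ifs
    · simp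
    · cases h : splitNl rest with
      | nil => exact absurd h ih
      | cons hd tl => simp [List.modifyHead]

-- reference tokenisation of a line list
def toks : List String → List (Int × Option String × Option String × String)
  | [] => []
  | [l] => if l ≠ "" then [((0 : Int), none, none, l)] else []
  | l :: ls => (if l ≠ "" then [((0 : Int), none, none, l)] else [])
      ++ ((1 : Int), (none : Option String), (none : Option String), "\n") :: toks ls

theorem go_eq_splitNl (fuel : Nat) (l cur : List Char) (acc : List (List Char))
    (h : l.length < fuel) :
    PySem.Chars.splitOn.go ['\n'] fuel l cur acc
      = acc.reverse ++ (splitNl l).modifyHead (cur.reverse ++ ·) := by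
  induction l generalizing fuel cur acc with
  | nil =>
    cases fuel with
    | zero => omega
    | succ f => simp [PySem.Chars.splitOn.go, splitNl, List.modifyHead]
  | cons c rest ih =>
    cases fuel with
    | zero => omega
    | succ f =>
      rw [PySem.Chars.splitOn.go]
      by_cases hc : c = '\n'
      · subst hc
        rw [if_pos (by simp [List.isPrefixOf])]
        simp only [List.length_cons, List.length_nil, List.drop_succ_cons, List.drop_zero]
        rw [ih f [] ((cur.reverse) :: acc) (by simpa using Nat.lt_of_succ_lt_succ h)]
        simp only [splitNl]
        cases hs : splitNl rest with
        | nil => exact absurd hs (splitNl_ne_nil rest)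
        | cons hd tl => simp [List.modifyHead]
      · rw [if_neg (by simp [List.isPrefixOf]; exact Ne.symm hc)]
        rw [ih f (c :: cur) acc (by simpa using Nat.lt_of_succ_lt_succ h)]
        simp only [splitNl, if_neg hc]
        cases hs : splitNl rest with
        | nil => exact absurd hs (splitNl_ne_nil rest)
        | cons hd tl => simp [List.modifyHead]

theorem splitOn_nl (cs : List Char) :
    PySem.Chars.splitOn cs ['\n'] = splitNl cs := by
  rw [PySem.Chars.splitOn, go_eq_splitNl cs.length.succ cs [] [] (Nat.lt_succ_self _)]
  cases hs : splitNl cs with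
  | nil => exact absurd hs (splitNl_ne_nil cs)
  | cons hd tl => simp [List.modifyHead]

theorem tokAltGo_eq (cs : List Char) (buf : List Char) :
    tokAltGo cs buf = toks (((splitNl cs).modifyHead (buf ++ ·)).map String.ofList) := by
  induction cs generalizing buf with
  | nil =>
    simp only [tokAltGo, splitNl, List.modifyHead, List.map, List.append_nil, toks]
    by_cases hb : buf = []
    · simp [hb]
    · simp [List.isEmpty_iff, hb]
  | cons c rest ih =>
    by_cases hc : c = '\n'
    · subst hc
      simp only [tokAltGo, splitNl]
      rw [ih []]
      cases hs : splitNl rest with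
      | nil => exact absurd hs (splitNl_ne_nil rest)
      | cons hd tl =>
        simp only [List.modifyHead, List.nil_append, List.map]
        cases tl with
        | nil =>
          simp only [List.isEmpty_iff]
          by_cases hb : buf = []
          · simp [hb, toks]
          · simp [hb, toks]
        | cons x xs =>
          simp only [toks, List.isEmpty_iff, List.map]
          by_cases hb : buf = []
          · simp [hb, toks]
          · simp [hb, toks]
    · simp only [tokAltGo, if_neg hc, splitNl]
      rw [ih (buf ++ [c])]
      cases hs : splitNl rest with
      | nil => exact absurd hs (splitNl_ne_nil rest)
      | cons hd tl => simp [List.modifyHead]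

theorem foldA (lines : List String) (last : Int) (s : Int) (acc : List (Int × Option String × Option String × String))
    (h : last = s + lines.length - 1) :
    (PySem.List.enumerate lines s).foldl
      (fun acc p =>
        acc ++ (if p.2 ≠ "" then [((0 : Int), (none : Option String), (none : Option String), p.2)] else [])
            ++ (if p.1 < last then [((1 : Int), (none : Option String), (none : Option String), "\n")] else []))
      acc = acc ++ toks lines := by
  induction lines generalizing s acc with
  | nil => simp [PySem.List.enumerate_nil, toks]
  | cons l ls ih =>
    rw [PySem.List.enumerate_cons, List.foldl_cons]
    cases ls with
    | nil =>
      have hlt : ¬ (s < last) := by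
        simp only [List.length_cons, List.length_nil] at h
        omega
      simp [PySem.List.enumerate_nil, toks, hlt]
    | cons x xs =>
      have hlt : s < last := by
        simp only [List.length_cons] at h
        push_cast at h
        omega
      rw [ih (s + 1) _ (by simp only [List.length_cons] at h ⊢; push_cast at h ⊢; omega)]
      simp only [toks, if_pos hlt]
      cases hl : decide (l ≠ "") <;> simp_all [List.append_assoc]

-- ===== VERDICT (by name: the statement is the Claim_ definition above) =====
theorem tokenize_newline_spec : Claim_equal_tokenize_newline := by
  intro data _
  show tokenize_newline data = tokenize_newline_alt data
  rw [tokenize_newline, tokenize_newline_alt, tokAltGo_eq]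
  rw [splitOn_nl]
  rw [foldA ((splitNl data.toList).map String.ofList) _ 0 [] (by simp)]
  cases hs : splitNl data.toList with
  | nil => exact absurd hs (splitNl_ne_nil data.toList)
  | cons hd tl => simp [List.modifyHead]
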